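-- pv_equiv track=rewrite | github.com/haunglai/odpython | 11/Python 实现【工号不够用了怎么办】/Python 实现【工号不够用了怎么办】.py | solve
-- ===== SOURCE A (Python) =====
-- def solve(x, y):
--     z = 1
--     base = pow(26, y)
--     factor = 10
--     while (True):
--         if base * factor >= x:
--             return z
--         z += 1
--         factor *= 10
-- ===== SOURCE B (Python) =====
-- def solve(x, y):
--     base = pow(26, y)
--     if base * 10 >= x:
--         return 1
--     need = -(-x // base)          # ceil(x / base); here x > 10*base >= 10
--     return len(str(need - 1))     # number of decimal digits of need-1 = least z with 10**z >= need
-- ===== Notes on version B (the rewrite author's own statement) =====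
-- stated objective: simpler
-- what changed: Replaces the factor-growing trial loop with a closed form: one ceiling division by 26^y and the decimal digit count of the quotient minus one, clamped to 1 by the first-iteration test.
-- outside the precondition, e.g. on solve(100, -1): A returns 4, B returns 6
import Mathlib
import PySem

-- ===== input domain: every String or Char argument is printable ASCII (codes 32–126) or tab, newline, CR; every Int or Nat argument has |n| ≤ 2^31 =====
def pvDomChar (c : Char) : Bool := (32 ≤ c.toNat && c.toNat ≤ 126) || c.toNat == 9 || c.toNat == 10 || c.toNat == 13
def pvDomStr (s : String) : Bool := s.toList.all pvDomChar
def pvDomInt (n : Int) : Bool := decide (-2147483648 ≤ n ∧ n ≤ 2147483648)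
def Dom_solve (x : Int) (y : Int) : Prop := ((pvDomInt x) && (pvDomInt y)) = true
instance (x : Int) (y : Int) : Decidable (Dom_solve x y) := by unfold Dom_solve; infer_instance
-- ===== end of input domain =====

-- B replaces A's factor-growing trial loop by one ceiling division and a decimal digit count
-- (objective: simpler — a closed form instead of a loop; measured cost is comparable).
-- Equivalence is claimed on Pre_solve, where A's arithmetic is exact integer arithmetic.

-- ===== PORT A =====
-- the while-True loop of A; the 'else z' branch is a totality guard only:
-- every call made by `solve` has 1 ≤ base and factor = 10, so 0 < base * factor there.
def solveLoop (x : Int) (base : Int) (z : Int) (factor : Int) : Int :=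
  if base * factor ≥ x then z
  else if h : 0 < base * factor then
    solveLoop x base (z + 1) (factor * 10)
  else z
termination_by (x - base * factor).toNat
decreasing_by
  rename_i hlt
  have h9 : base * factor + 9 ≤ base * (factor * 10) := by nlinarith
  omega

-- base = pow(26, y); exact integer arithmetic for y ≥ 0; for y < 0 Python produces a float
def solve (x : Int) (y : Int) : Int :=
  solveLoop x ((26 : Int) ^ y.toNat) 1 10

-- ===== PORT B =====
def solve_alt (x : Int) (y : Int) : Int :=
  let base : Int := (26 : Int) ^ y.toNat
  if base * 10 ≥ x then 1
  else
    let need : Int := -(PySem.Int.floordiv (-x) base)   -- -(-x // base)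
    PySem.Str.len (PySem.Int.toStr (need - 1))          -- len(str(need - 1))

-- ===== PRECONDITION & SPEC =====
-- Pre_solve excludes y < 0 with x > 0: there A's pow(26, y) is a float and A's result depends on
-- float rounding of base * factor, which the Int type convention cannot express (for x ≤ 0 the
-- very first comparison succeeds regardless, so those inputs stay inside).
def Pre_solve (x : Int) (y : Int) : Prop := 0 ≤ y ∨ x ≤ 0
instance (x : Int) (y : Int) : Decidable (Pre_solve x y) := by unfold Pre_solve; infer_instance
def pvWitness_solve : Int × Int := (1000, 1)

def Spec_solve (x : Int) (y : Int) (out : Int) : Prop := out = solve_alt x y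
instance (x : Int) (y : Int) (out : Int) : Decidable (Spec_solve x y out) := by unfold Spec_solve; infer_instance

-- ===== CLAIM (what is proved, stated in full; the proofs are below) =====
def Claim_equal_solve : Prop := ∀ (x : Int) (y : Int), Dom_solve x y → Pre_solve x y → Spec_solve x y (solve x y)

-- ===== LEMMAS AND PROOFS =====

-- exact length of Lean-core decimal printing: Nat.log 10 n + 1 digits
lemma toDigitsCore_len_exact : ∀ (f n : Nat) (acc : List Char), n < f →
    (Nat.toDigitsCore 10 f n acc).length = Nat.log 10 n + 1 + acc.length := by
  intro f
  induction f with
  | zero => intro n acc h; omega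
  | succ f ih =>
    intro n acc h
    rw [Nat.toDigitsCore]
    by_cases h10 : n / 10 = 0
    · have hn : n < 10 := by omega
      simp [h10, Nat.log_eq_zero_iff.mpr (Or.inl hn)]
      omega
    · have hn : 10 ≤ n := by omega
      rw [if_neg h10, ih (n / 10) _ (by omega)]
      have hlog : Nat.log 10 (n / 10) = Nat.log 10 n - 1 := Nat.log_div_base 10 n
      have hpos : 0 < Nat.log 10 n := Nat.log_pos (by norm_num) hn
      simp [hlog]
      omega

lemma toStr_len_exact (n : Int) (h : 0 ≤ n) :
    PySem.Str.len (PySem.Int.toStr n) = ((Nat.log 10 n.toNat + 1 : Nat) : Int) := by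
  simp only [PySem.Str.len, PySem.Int.toList_toStr, PySem.Int.toChars, if_neg (by omega : ¬ n < 0)]
  rw [Nat.toDigits, toDigitsCore_len_exact (n.toNat + 1) n.toNat [] (by omega)]
  simp

-- the loop returns the least z ≥ k with base * 10^z ≥ x, characterized by the three conjuncts
lemma solveLoop_char (x b : Int) (hb : 1 ≤ b) :
    ∀ (n k : Nat), 1 ≤ k → x ≤ b * 10 ^ (k + n) →
      (∀ j : Nat, 1 ≤ j → j < k → b * 10 ^ j < x) →
      (x ≤ b * 10 ^ ((solveLoop x b (k : Int) ((10 : Int) ^ k)).toNat) ∧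
       (k : Int) ≤ solveLoop x b (k : Int) ((10 : Int) ^ k) ∧
       ∀ j : Nat, 1 ≤ j → (j : Int) < solveLoop x b (k : Int) ((10 : Int) ^ k) → b * 10 ^ j < x) := by
  intro n
  induction n with
  | zero =>
    intro k hk hbound hlow
    rw [solveLoop, if_pos (by simpa using hbound)]
    exact ⟨by simpa using hbound, le_refl _, fun j hj1 hjk => hlow j hj1 (by exact_mod_cast hjk)⟩
  | succ n ih =>
    intro k hk hbound hlow
    by_cases hstop : b * (10 : Int) ^ k ≥ x
    · rw [solveLoop, if_pos hstop]
      refine ⟨by simpa using hstop, le_refl _, fun j hj1 hjk => ?_⟩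
      exact hlow j hj1 (by exact_mod_cast hjk)
    · have hpos : 0 < b * (10 : Int) ^ k := by positivity
      rw [solveLoop, if_neg hstop, dif_pos hpos]
      have hrec : ((k : Int) + 1) = ((k + 1 : Nat) : Int) := by push_cast; ring
      have hfac : (10 : Int) ^ k * 10 = (10 : Int) ^ (k + 1) := by ring
      rw [hrec, hfac]
      have hbound' : x ≤ b * 10 ^ (k + 1 + n) := by
        have : k + 1 + n = k + (n + 1) := by omega
        rw [this]; exact hbound
      have hlow' : ∀ j : Nat, 1 ≤ j → j < k + 1 → b * 10 ^ j < x := by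
        intro j hj1 hjk
        rcases Nat.lt_succ_iff_lt_or_eq.mp hjk with h | h
        · exact hlow j hj1 h
        · subst h; exact lt_of_not_ge hstop
      obtain ⟨c1, c2, c3⟩ := ih (k + 1) (by omega) hbound' hlow'
      exact ⟨c1, le_trans (by push_cast; omega) c2, c3⟩

theorem solve_spec : Claim_equal_solve := by
  intro x y hdom _hpre
  unfold Spec_solve solve solve_alt
  set b : Int := (26 : Int) ^ y.toNat with hbdef
  have hb : (1 : Int) ≤ b := one_le_pow₀ (by norm_num)
  have hb0 : (0 : Int) < b := by omega
  by_cases h0 : b * 10 ≥ x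
  · rw [solveLoop, if_pos h0]; simp [h0]
  · rw [if_neg h0]
    -- domain bound: |x| ≤ 2^31 < 10^10
    have hx31 : x ≤ 2147483648 := by
      unfold Dom_solve pvDomInt at hdom
      simp only [Bool.and_eq_true, decide_eq_true_eq] at hdom
      exact hdom.1.2
    have hbound : x ≤ b * 10 ^ (1 + 9) := by
      have h1 : (10 : Int) ^ (1 + 9) = 10000000000 := by norm_num
      nlinarith
    obtain ⟨c1, c2, c3⟩ := solveLoop_char x b hb 9 1 (le_refl 1) hbound
      (by intro j hj1 hjk; omega)
    set r : Int := solveLoop x b ((1 : Nat) : Int) ((10 : Int) ^ (1 : Nat)) with hrdef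
    have hr : solveLoop x b 1 10 = r := by norm_num [hrdef]
    rw [hr]
    -- B's value
    set need : Int := -(PySem.Int.floordiv (-x) b) with hneed
    have hceil := (PySem.Int.neg_floordiv_neg_eq_iff_of_pos (a := x) (b := b) hb0).mp hneed.symm
    obtain ⟨hclo, hchi⟩ := hceil
    set m : Int := need - 1 with hmdef
    have hm1 : m * b < x := by rw [hmdef]; exact hclo
    have hm2 : x ≤ (m + 1) * b := by rw [hmdef]; simpa using hchi
    have hxb : b * 10 < x := lt_of_not_ge h0
    have hm10 : 10 ≤ m := by nlinarith
    have hm0 : (0 : Int) ≤ m := by omega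
    set L : Nat := Nat.log 10 m.toNat + 1 with hLdef
    have hlen : PySem.Str.len (PySem.Int.toStr (need - 1)) = ((L : Nat) : Int) := by
      rw [← hmdef, toStr_len_exact m hm0, hLdef]
    rw [hlen]
    have hmcast : ((m.toNat : Nat) : Int) = m := Int.toNat_of_nonneg hm0
    -- L satisfies the characterization
    have hL1 : x ≤ b * 10 ^ L := by
      have hlt : m.toNat < 10 ^ L := Nat.lt_pow_succ_log_self (by norm_num) m.toNat
      have hlt' : m < (10 : Int) ^ L := by
        rw [← hmcast]; exact_mod_cast hlt
      nlinarith
    have hL2 : ∀ j : Nat, 1 ≤ j → j < L → b * 10 ^ j < x := by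
      intro j hj1 hjL
      have hjle : j ≤ Nat.log 10 m.toNat := by omega
      have hple : (10 : Nat) ^ j ≤ m.toNat :=
        le_trans (Nat.pow_le_pow_right (by norm_num) hjle)
          (Nat.pow_log_le_self 10 (by omega))
      have hple' : (10 : Int) ^ j ≤ m := by
        rw [← hmcast]; exact_mod_cast hple
      nlinarith
    -- uniqueness of the least z
    have hr1 : (1 : Int) ≤ r := c2
    rcases lt_trichotomy r ((L : Nat) : Int) with h | h | h
    · exfalso
      have hj1 : 1 ≤ r.toNat := by omega
      have hlt := hL2 r.toNat hj1 (by omega)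
      exact absurd c1 (not_le.mpr hlt)
    · exact h
    · exfalso
      have hlt := c3 L (by omega) h
      exact absurd hL1 (not_le.mpr hlt)
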